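-- pv_equiv track=rewrite | github.com/stephsilne/CS-115 | homework/life_starter/life.py | diagonalize
-- ===== SOURCE A (Python) =====
-- def createOneRow(width):
--     """Returns one row of zeros of width "width"...
--        You should use this in your
--        createBoard(width, height) function."""
--     row = []
--     for col in range(width):
--         row += [0]
--     return row
--
-- def createBoard(width,height):
--     '''creates and returns a new 2D list of height rows and width columns with all elements equaling 0'''
--     A = []
--     '''initializes A to be an empty list'''
--     for row in range(height):
--         '''for every row of the range of height'''
--         A += [createOneRow(width)]
--         '''increments A for every iteration of the list createOneRow(width)'''
--     return A
--     '''returns the final board A'''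
--
-- def diagonalize(width,height):
--     '''creates a newBoard of diagonal live cells in an otherwise empty board'''
--     A = createBoard(width,height)
--     '''initializes A to be an empty board of given width and height'''
--     for row in range(height):
--         '''for every iterated row of given height'''
--         for col in range(width):
--             '''for every iterated col of given width'''
--             if row == col:
--                 '''if the row and col of a given cell are equal'''
--                 A[row][col] = 1
--                 '''that cell should be equal to 1'''
--             else:
--                 A[row][col] = 0
--                 '''otherwise it should be left a dead cell (0)'''
--     return A
--     '''returns the final diagonliazed board'''
-- ===== SOURCE B (Python) =====
-- def diagonalize(width, height):
--     A = [[0] * width for _ in range(height)]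
--     for i in range(min(width, height)):
--         A[i][i] = 1
--     return A
-- ===== Notes on version B (the rewrite author's own statement) =====
-- stated objective: simpler
-- what changed: Replaces the nested row/col scan with a row==col branch in every cell by a direct zero-fill of the board plus a single one-dimensional pass of length min(width,height) that sets only the diagonal cells.
import Mathlib
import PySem

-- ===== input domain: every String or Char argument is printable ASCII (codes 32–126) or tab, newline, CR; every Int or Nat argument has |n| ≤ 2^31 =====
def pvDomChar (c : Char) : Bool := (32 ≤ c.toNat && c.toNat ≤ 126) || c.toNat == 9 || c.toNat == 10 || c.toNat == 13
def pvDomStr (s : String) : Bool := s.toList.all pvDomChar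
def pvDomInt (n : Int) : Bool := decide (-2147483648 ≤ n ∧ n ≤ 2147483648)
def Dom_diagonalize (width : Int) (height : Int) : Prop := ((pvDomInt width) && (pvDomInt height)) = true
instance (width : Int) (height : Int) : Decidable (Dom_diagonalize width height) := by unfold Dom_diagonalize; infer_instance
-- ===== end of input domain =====

-- B replaces A's nested row/col scan (a row==col branch at every cell) by a zero-fill plus a single diagonal pass of length min(width,height); objective: simpler.


-- ===== PORT A =====
def createOneRow (width : Int) : List Int :=
  (PySem.List.pyRange 0 width 1).foldl (fun row _ => row ++ [0]) []

def createBoard (width : Int) (height : Int) : List (List Int) :=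
  (PySem.List.pyRange 0 height 1).foldl (fun A _ => A ++ [createOneRow width]) []

def diagonalize (width : Int) (height : Int) : List (List Int) :=
  (PySem.List.pyRange 0 height 1).foldl (fun A row =>
    (PySem.List.pyRange 0 width 1).foldl (fun A col =>
      A.set row.toNat ((A.getD row.toNat []).set col.toNat (if row = col then 1 else 0))) A)
    (createBoard width height)

-- ===== PORT B =====
def diagonalize_alt (width : Int) (height : Int) : List (List Int) :=
  let A := List.replicate height.toNat (List.replicate width.toNat 0)
  (PySem.List.pyRange 0 (min width height) 1).foldl
    (fun A i => A.set i.toNat ((A.getD i.toNat []).set i.toNat 1)) A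

-- ===== PRECONDITION & SPEC =====
def Spec_diagonalize (width : Int) (height : Int) (out : List (List Int)) : Prop := out = diagonalize_alt width height
instance (width : Int) (height : Int) (out : List (List Int)) : Decidable (Spec_diagonalize width height out) := by unfold Spec_diagonalize; infer_instance

-- ===== CLAIM (what is proved, stated in full; the proofs are below) =====
def Claim_equal_diagonalize : Prop := ∀ (width : Int) (height : Int), Dom_diagonalize width height → Spec_diagonalize width height (diagonalize width height)

-- ===== LEMMAS AND PROOFS =====

theorem foldl_append_const {α β : Type} (l : List β) (x : α) :
    ∀ acc : List α, l.foldl (fun r _ => r ++ [x]) acc = acc ++ List.replicate l.length x := by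
  induction l with
  | nil => intro acc; simp
  | cons b bs ih =>
      intro acc
      simp [List.foldl_cons, ih, List.replicate_succ]

theorem createOneRow_eq (width : Int) : createOneRow width = List.replicate width.toNat 0 := by
  rw [createOneRow, foldl_append_const]
  simp [PySem.List.length_pyRange_one]

theorem createBoard_eq (width height : Int) :
    createBoard width height = List.replicate height.toNat (List.replicate width.toNat 0) := by
  rw [createBoard, foldl_append_const]
  simp [PySem.List.length_pyRange_one, createOneRow_eq]

theorem foldl_congr_fun {α β : Type} (l : List β) (f g : α → β → α) :
    (∀ a b, b ∈ l → f a b = g a b) → ∀ init : α, l.foldl f init = l.foldl g init := by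
  induction l with
  | nil => intro _ init; rfl
  | cons b bs ih =>
      intro h init
      simp only [List.foldl_cons]
      rw [h init b List.mem_cons_self]
      exact ih (fun a c hc => h a c (List.mem_cons_of_mem b hc)) _

-- Extract A's inner column loop: it only ever rewrites row r of the board.
theorem inner_extract (g : Nat → Int) (cs : List Nat) :
    ∀ (A : List (List Int)) (r : Nat),
      cs.foldl (fun A c => A.set r ((A.getD r []).set c (g c))) A
        = A.set r (cs.foldl (fun row c => row.set c (g c)) (A.getD r [])) := by
  induction cs with
  | nil =>
      intro A r
      by_cases hr : r < A.length
      · rw [List.getD_eq_getElem?_getD, List.getElem?_eq_getElem hr]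
        exact (List.set_getElem_self hr).symm
      · simp [List.set_eq_of_length_le (le_of_not_gt hr)]
  | cons c cs ih =>
      intro A r
      by_cases hr : r < A.length
      · have hset : ((A.set r ((A.getD r []).set c (g c))).getD r [])
            = (A.getD r []).set c (g c) := by
          rw [List.getD_eq_getElem?_getD, List.getElem?_set]
          simp [hr]
        simp only [List.foldl_cons, ih, hset, List.set_set]
      · have hA : A.set r ((A.getD r []).set c (g c)) = A :=
          List.set_eq_of_length_le (le_of_not_gt hr)
        have hgd : A.getD r [] = [] := by
          rw [List.getD_eq_getElem?_getD, List.getElem?_eq_none (le_of_not_gt hr)]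
          rfl
        simp only [List.foldl_cons, hA, ih, hgd]
        simp [List.set_eq_of_length_le (le_of_not_gt hr)]

-- Fold of pointwise sets over range n, described elementwise.
theorem foldl_set_length {α : Type} (g : Nat → α) (n : Nat) (xs : List α) :
    ((List.range n).foldl (fun r c => r.set c (g c)) xs).length = xs.length := by
  induction n with
  | zero => simp
  | succ m ih => simp [List.range_succ, ih]

theorem foldl_set_getElem? {α : Type} (g : Nat → α) (n : Nat) (xs : List α) (j : Nat) :
    ((List.range n).foldl (fun r c => r.set c (g c)) xs)[j]?
      = if j < n ∧ j < xs.length then some (g j) else xs[j]? := by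
  induction n with
  | zero => simp
  | succ m ih =>
      rw [List.range_succ, List.foldl_append]
      simp only [List.foldl_cons, List.foldl_nil]
      rw [List.getElem?_set, foldl_set_length, ih]
      by_cases hl : j < xs.length
      · by_cases hmj : m = j
        · subst hmj
          simp [hl, Nat.lt_succ_self]
        · have hiff : j < m + 1 ↔ j < m := by omega
          simp [hmj, hl, hiff]
      · have hx : xs[j]? = none := List.getElem?_eq_none (le_of_not_gt hl)
        by_cases hmj : m = j
        · subst hmj
          simp [hl, hx]
        · simp [hmj, hl, hx]

-- Setting one entry of a mapped range, as a new mapped range.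
theorem set_map_range {α : Type} (H : Nat) (f : Nat → α) (m : Nat) (hm : m < H) (v : α) :
    ((List.range H).map f).set m v = (List.range H).map (fun r => if r = m then v else f r) := by
  apply List.ext_getElem?
  intro j
  rw [List.getElem?_set]
  by_cases hj : j < H
  · rw [List.getElem?_map, List.getElem?_map, List.getElem?_range hj]
    by_cases hmj : m = j
    · subst hmj
      simp [hm]
    · have h2 : ¬ j = m := fun h => hmj h.symm
      simp [hmj, h2]
  · have h1 : (List.range H)[j]? = none :=
      List.getElem?_eq_none (by simpa using Nat.le_of_not_lt hj)
    by_cases hmj : m = j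
    · subst hmj
      simp [h1, Nat.le_of_not_lt hj]
    · simp [hmj, h1]

theorem replicate_eq_map_range {α : Type} (H : Nat) (x : α) :
    List.replicate H x = (List.range H).map (fun _ => x) := by
  apply List.ext_getElem?
  intro j
  by_cases hj : j < H
  · simp [List.getElem?_replicate, hj, List.getElem?_map, List.getElem?_range hj]
  · have h1 : (List.range H)[j]? = none :=
      List.getElem?_eq_none (by simpa using Nat.le_of_not_lt hj)
    simp [List.getElem?_replicate, hj, h1]

-- The diagonal row of index r in a width-W zero row.
theorem row_fold_eq (W r : Nat) :
    (List.range W).foldl (fun row c => row.set c (if r = c then (1 : Int) else 0))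
        (List.replicate W (0 : Int))
      = if r < W then (List.replicate W (0 : Int)).set r 1 else List.replicate W (0 : Int) := by
  apply List.ext_getElem?
  intro j
  rw [foldl_set_getElem? (fun c => if r = c then (1 : Int) else 0) W _ j]
  simp only [List.length_replicate]
  by_cases hj : j < W
  · by_cases hrW : r < W
    · rw [if_pos hrW, List.getElem?_set]
      simp only [List.length_replicate]
      by_cases hrj : r = j
      · subst hrj
        simp [hj, hrW]
      · simp [hrj, hj, List.getElem?_replicate]
    · rw [if_neg hrW]
      have hrj : ¬ r = j := by omega
      simp [hj, hrj, List.getElem?_replicate]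
  · have hnone : (List.replicate W (0 : Int))[j]? = none := by
      simp [List.getElem?_replicate, hj]
    have hc : ¬ (j < W ∧ j < W) := fun h => hj h.1
    by_cases hrW : r < W
    · rw [if_pos hrW, List.getElem?_set]
      have hrj : ¬ r = j := by omega
      simp [hrj, hc, hnone]
      omega
    · simp [hrW, hc, hnone]
      omega

-- A's outer loop, after the inner loop is extracted: invariant over the first n rows.
theorem outerA (W H : Nat) :
    ∀ n, n ≤ H →
      (List.range n).foldl
          (fun A r => A.set r ((List.range W).foldl
              (fun row c => row.set c (if r = c then (1 : Int) else 0)) (A.getD r [])))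
          (List.replicate H (List.replicate W (0 : Int)))
        = (List.range H).map (fun r => if r < n then
            ((List.range W).foldl (fun row c => row.set c (if r = c then (1 : Int) else 0))
              (List.replicate W (0 : Int)))
          else List.replicate W (0 : Int)) := by
  intro n
  induction n with
  | zero =>
      intro _
      rw [replicate_eq_map_range]
      apply List.map_congr_left
      intro r _
      simp
  | succ m ih =>
      intro hm
      have hmH : m < H := hm
      rw [List.range_succ, List.foldl_append, ih (Nat.le_of_lt hmH)]
      simp only [List.foldl_cons, List.foldl_nil]
      rw [List.getD_eq_getElem?_getD, List.getElem?_map, List.getElem?_range hmH]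
      simp only [Option.map_some, Option.getD_some, lt_irrefl, if_neg (lt_irrefl m)]
      rw [set_map_range H _ m hmH]
      apply List.map_congr_left
      intro r hr
      by_cases hrm : r = m
      · subst hrm
        simp
      · by_cases hlt : r < m
        · simp [hrm, hlt, show r < m + 1 by omega]
        · simp [hrm, hlt, show ¬ r < m + 1 by omega]

-- B's diagonal pass: invariant over the first n diagonal cells.
theorem outerB (W H : Nat) :
    ∀ n, n ≤ min W H →
      (List.range n).foldl
          (fun A i => A.set i ((A.getD i []).set i (1 : Int)))
          (List.replicate H (List.replicate W (0 : Int)))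
        = (List.range H).map (fun r => if r < n then (List.replicate W (0 : Int)).set r 1
            else List.replicate W (0 : Int)) := by
  intro n
  induction n with
  | zero =>
      intro _
      rw [replicate_eq_map_range]
      apply List.map_congr_left
      intro r _
      simp
  | succ m ih =>
      intro hm
      have hmH : m < H := lt_of_lt_of_le (Nat.lt_succ_self m) (le_trans hm (min_le_right W H))
      rw [List.range_succ, List.foldl_append, ih (by omega)]
      simp only [List.foldl_cons, List.foldl_nil]
      rw [List.getD_eq_getElem?_getD, List.getElem?_map, List.getElem?_range hmH]
      simp only [Option.map_some, Option.getD_some, if_neg (lt_irrefl m)]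
      rw [set_map_range H _ m hmH]
      apply List.map_congr_left
      intro r hr
      by_cases hrm : r = m
      · subst hrm
        simp
      · by_cases hlt : r < m
        · simp [hrm, hlt, show r < m + 1 by omega]
        · simp [hrm, hlt, show ¬ r < m + 1 by omega]

-- ===== VERDICT (by name: the statement is the Claim_ definition above) =====
theorem diagonalize_spec : Claim_equal_diagonalize := by
  intro width height _
  unfold Spec_diagonalize diagonalize diagonalize_alt
  rw [createBoard_eq]
  set W := width.toNat with hW
  set H := height.toNat with hH
  rw [PySem.List.pyRange_one 0 height, PySem.List.pyRange_one 0 (min width height),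
      List.foldl_map, List.foldl_map]
  have hmin : (min width height - 0).toNat = min W H := by
    simp only [hW, hH]; omega
  have hHn : (height - 0).toNat = H := by omega
  rw [hmin, hHn]
  rw [foldl_congr_fun (List.range H) _
      (fun A r => A.set r ((List.range W).foldl
          (fun row c => row.set c (if r = c then (1 : Int) else 0)) (A.getD r [])))
      (by
        intro A r _
        rw [PySem.List.pyRange_one 0 width, List.foldl_map]
        have hWn : (width - 0).toNat = W := by omega
        rw [hWn]
        rw [foldl_congr_fun (List.range W) _
            (fun A c => A.set r ((A.getD r []).set c (if r = c then (1 : Int) else 0)))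
            (by intro B c _; simp [Nat.cast_inj]) A]
        exact inner_extract (fun c => if r = c then (1 : Int) else 0) (List.range W) A r)]
  rw [foldl_congr_fun (List.range (min W H)) _
      (fun A i => A.set i ((A.getD i []).set i (1 : Int)))
      (by intro A i _; simp)]
  rw [outerA W H H (le_refl H), outerB W H (min W H) (le_refl _)]
  apply List.map_congr_left
  intro r hr
  have hrH : r < H := List.mem_range.mp hr
  simp only [hrH, if_true]
  rw [row_fold_eq]
  by_cases hrW : r < W
  · simp [hrW, show r < min W H by omega]
  · simp [hrW, show ¬ r < min W H by omega]
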